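-- pv_equiv track=rewrite | github.com/githubliang14/Food-Finder-using-DFA | dfa_food_finder/dfa.py | get_accept_word_index
-- ===== SOURCE A (Python) =====
-- def get_accept_word_index(all_states, initial_states, word_len):
--     start = 0
--     idx = len(all_states) - 1
--     curr_word_len = 1
--     # Get the length of the accepted word
--     stopping_length = 0
--     for final, length in word_len:
--         if final == all_states[-1][0]:
--             stopping_length = length
--             break
--     # Reversed is used to get the nearest starting state
--     for state, _ in reversed(all_states):
--         # Retrieved index is the one start from 0 or space state
--         # this is to prevent getting wrong words
--         # e.g. 0 -> 1 -> 2 -> 3 (space state) -> 1 -> 2 -> 3 -> 4 -> 5 (final) -> ... -> ...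
--         # the correct sequence should be 3, 1, 2, 3, 4, 5, instead of 0, 1, 2, 3, 1, 2, 3, 4, 5
--         if state in initial_states:
--             if stopping_length + 1 == curr_word_len:
--                 start = idx
--                 break
--         idx -= 1
--         curr_word_len += 1
--     return start
-- ===== SOURCE B (Python) =====
-- def get_accept_word_index(all_states, initial_states, word_len):
--     last = all_states[-1][0] if all_states else None
--     stopping_length = next((length for final, length in word_len if final == last), 0)
--     target = len(all_states) - 1 - stopping_length
--     if 0 <= target < len(all_states) and all_states[target][0] in initial_states:
--         return target
--     return 0
-- ===== Notes on version B (the rewrite author's own statement) =====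
-- stated objective: faster
-- what changed: Replaced the reversed scan with curr_word_len/idx counters by a direct index computation target = len(all_states)-1-stopping_length plus one bounds-checked lookup (the scan over all_states disappears), and the break-out first loop by a next() generator lookup.
import Mathlib
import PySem

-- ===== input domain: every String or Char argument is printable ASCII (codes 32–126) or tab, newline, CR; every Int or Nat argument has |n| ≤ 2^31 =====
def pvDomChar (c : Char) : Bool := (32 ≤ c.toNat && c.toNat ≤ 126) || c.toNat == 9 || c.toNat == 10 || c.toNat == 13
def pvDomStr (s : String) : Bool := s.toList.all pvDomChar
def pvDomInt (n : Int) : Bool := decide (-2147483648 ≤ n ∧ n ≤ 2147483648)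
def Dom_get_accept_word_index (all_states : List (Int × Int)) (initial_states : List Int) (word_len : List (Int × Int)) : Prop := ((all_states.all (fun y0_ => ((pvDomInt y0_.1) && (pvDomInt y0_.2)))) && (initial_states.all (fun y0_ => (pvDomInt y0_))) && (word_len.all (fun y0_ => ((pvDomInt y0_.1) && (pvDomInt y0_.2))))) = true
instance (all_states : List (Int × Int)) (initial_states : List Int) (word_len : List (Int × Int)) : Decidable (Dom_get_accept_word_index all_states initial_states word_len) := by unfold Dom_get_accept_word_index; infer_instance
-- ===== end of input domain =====

-- B replaces A's reversed scan over all_states (counters idx/curr_word_len) by a direct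
-- index computation and one bounds-checked lookup (measured faster).

-- ===== PORT A =====
-- first loop of A: break at the first pair whose fst equals all_states[-1][0];
-- pyGet? = none is where Python raises IndexError (excluded by Pre_); 0 is returned only there
def pvStopA (all_states : List (Int × Int)) : List (Int × Int) → Int
  | [] => 0
  | (f, l) :: rest =>
      match PySem.List.pyGet? all_states (-1) with
      | some p => if f = p.1 then l else pvStopA all_states rest
      | none => 0

-- second loop of A over reversed(all_states) with idx and curr_word_len counters
def pvLoopA (init : List Int) (stop : Int) : List (Int × Int) → Int → Int → Int
  | [], _, _ => 0
  | (s, _) :: rest, idx, cwl =>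
      if s ∈ init ∧ stop + 1 = cwl then idx
      else pvLoopA init stop rest (idx - 1) (cwl + 1)

def get_accept_word_index (all_states : List (Int × Int)) (initial_states : List Int) (word_len : List (Int × Int)) : Int :=
  let stopping_length := pvStopA all_states word_len
  pvLoopA initial_states stopping_length all_states.reverse ((all_states.length : Int) - 1) 1

-- ===== PORT B =====
-- B's next(...) lookup: first pair whose fst equals `last` (an Option, None when all_states is empty)
def pvStopB (last : Option Int) : List (Int × Int) → Int
  | [] => 0
  | (f, l) :: rest => if last = some f then l else pvStopB last rest

def get_accept_word_index_alt (all_states : List (Int × Int)) (initial_states : List Int) (word_len : List (Int × Int)) : Int :=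
  let last : Option Int := (PySem.List.pyGet? all_states (-1)).map Prod.fst
  let stopping_length := pvStopB last word_len
  let target : Int := (all_states.length : Int) - 1 - stopping_length
  if 0 ≤ target ∧ target < (all_states.length : Int) then
    match PySem.List.pyGet? all_states target with
    | some p => if p.1 ∈ initial_states then target else 0
    | none => 0
  else 0

-- ===== PRECONDITION & SPEC =====
-- Pre_ excludes only the inputs where A raises IndexError (empty all_states with nonempty word_len)
def Pre_get_accept_word_index (all_states : List (Int × Int)) (initial_states : List Int) (word_len : List (Int × Int)) : Prop := all_states ≠ [] ∨ word_len = []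
instance (all_states : List (Int × Int)) (initial_states : List Int) (word_len : List (Int × Int)) : Decidable (Pre_get_accept_word_index all_states initial_states word_len) := by unfold Pre_get_accept_word_index; infer_instance
def pvWitness_get_accept_word_index : (List (Int × Int)) × List Int × (List (Int × Int)) := ([(0, 0), (1, 1)], [0], [(1, 1)])

def Spec_get_accept_word_index (all_states : List (Int × Int)) (initial_states : List Int) (word_len : List (Int × Int)) (out : Int) : Prop := out = get_accept_word_index_alt all_states initial_states word_len
instance (all_states : List (Int × Int)) (initial_states : List Int) (word_len : List (Int × Int)) (out : Int) : Decidable (Spec_get_accept_word_index all_states initial_states word_len out) := by unfold Spec_get_accept_word_index; infer_instance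

-- ===== CLAIM (what is proved, stated in full; the proofs are below) =====
def Claim_equal_get_accept_word_index : Prop := ∀ (all_states : List (Int × Int)) (initial_states : List Int) (word_len : List (Int × Int)), Dom_get_accept_word_index all_states initial_states word_len → Pre_get_accept_word_index all_states initial_states word_len → Spec_get_accept_word_index all_states initial_states word_len (get_accept_word_index all_states initial_states word_len)

-- ===== LEMMAS AND PROOFS =====

-- the two first loops agree once all_states[-1] exists
lemma stop_eq (all_states : List (Int × Int)) (p : Int × Int)
    (h : PySem.List.pyGet? all_states (-1) = some p) (wl : List (Int × Int)) :
    pvStopA all_states wl = pvStopB (some p.1) wl := by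
  induction wl with
  | nil => rfl
  | cons x rest ih =>
    obtain ⟨f, l⟩ := x
    simp only [pvStopA, pvStopB, h]
    by_cases hf : f = p.1
    · simp [hf]
    · rw [if_neg hf, if_neg (by simpa using fun e => hf e.symm), ih]

-- characterisation of A's reversed loop: it fires exactly at offset stop+1-cwl
lemma pvLoopA_char (init : List Int) (stop : Int) (l : List (Int × Int)) (idx cwl : Int) :
    pvLoopA init stop l idx cwl =
      if 0 ≤ stop + 1 - cwl then
        match l[(stop + 1 - cwl).toNat]? with
        | some p => if p.1 ∈ init then idx - (stop + 1 - cwl) else 0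
        | none => 0
      else 0 := by
  induction l generalizing idx cwl with
  | nil =>
    simp only [pvLoopA, List.getElem?_nil]
    split <;> rfl
  | cons x rest ih =>
    obtain ⟨s, t⟩ := x
    show (if s ∈ init ∧ stop + 1 = cwl then idx else pvLoopA init stop rest (idx - 1) (cwl + 1)) = _
    by_cases hc : stop + 1 = cwl
    · have h0 : stop + 1 - cwl = 0 := by omega
      by_cases hs : s ∈ init
      · rw [if_pos ⟨hs, hc⟩]
        simp [h0, hs]
      · rw [if_neg (fun h => hs h.1), ih,
            if_neg (show ¬ (0:Int) ≤ stop + 1 - (cwl + 1) by omega)]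
        simp [h0, hs]
    · rw [if_neg (fun h => hc h.2), ih]
      by_cases hpos : (0:Int) ≤ stop + 1 - (cwl + 1)
      · have h1 : (0:Int) ≤ stop + 1 - cwl := by omega
        have h2 : (stop + 1 - cwl).toNat = (stop + 1 - (cwl + 1)).toNat + 1 := by omega
        rw [if_pos hpos, if_pos h1, h2, List.getElem?_cons_succ]
        cases hget : rest[(stop + 1 - (cwl + 1)).toNat]? with
        | none => rfl
        | some p =>
          by_cases hm : p.1 ∈ init
          · simp [hm]; ring
          · simp [hm]
      · rw [if_neg hpos, if_neg (show ¬ (0:Int) ≤ stop + 1 - cwl by omega)]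

-- ===== VERDICT (by name: the statement is the Claim_ definition above) =====
theorem get_accept_word_index_spec : Claim_equal_get_accept_word_index := by
  intro all_states initial_states word_len _ hpre
  unfold Spec_get_accept_word_index get_accept_word_index get_accept_word_index_alt
  rcases all_states with _ | ⟨a, as⟩
  · rcases hpre with h | h
    · exact absurd rfl h
    · subst h; rfl
  · obtain ⟨p, hp⟩ : ∃ p, PySem.List.pyGet? (a :: as) (-1) = some p := by
      rw [PySem.List.pyGet?_neg_one]
      exact ⟨_, List.getLast?_eq_some_getLast (by simp)⟩
    have hlast : (PySem.List.pyGet? (a :: as) (-1)).map Prod.fst = some p.1 := by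
      rw [hp]; rfl
    simp only [hlast, stop_eq (a :: as) p hp]
    set L := (a :: as : List (Int × Int)) with hL
    set stop := pvStopB (some p.1) word_len with hstop
    have hlen1 : 1 ≤ L.length := by simp [hL]
    rw [pvLoopA_char, show stop + 1 - 1 = stop from by ring]
    by_cases h0 : 0 ≤ stop ∧ stop < (L.length : Int)
    · have hsn : stop.toNat < L.length := by omega
      rw [if_pos h0.1,
          if_pos (show (0:Int) ≤ (L.length : Int) - 1 - stop ∧
            (L.length : Int) - 1 - stop < (L.length : Int) by omega),
          List.getElem?_reverse hsn]
      have hB : PySem.List.pyGet? L ((L.length : Int) - 1 - stop) =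
          L[((L.length : Int) - 1 - stop).toNat]? :=
        PySem.List.pyGet?_of_nonneg _ (by omega)
      rw [hB, show ((L.length : Int) - 1 - stop).toNat = L.length - 1 - stop.toNat from by omega]
    · rw [if_neg (show ¬ ((0:Int) ≤ (L.length : Int) - 1 - stop ∧
            (L.length : Int) - 1 - stop < (L.length : Int)) by omega)]
      by_cases hs0 : (0:Int) ≤ stop
      · have hbig : L.length ≤ stop.toNat := by omega
        rw [if_pos hs0, List.getElem?_eq_none (by simpa using hbig)]
      · rw [if_neg hs0]
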